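-- pv_equiv track=rewrite | github.com/evan-william/personal-project | Login Exercise/Codeforce/Exercises/Bear and Five Cards/BearAndFiveCards.py | min_sum_after_discard
-- ===== SOURCE A (Python) =====
-- from collections import Counter
--
-- def min_sum_after_discard(cards):
--     total_sum = sum(cards)  # Hitung jumlah total kartu
--     card_counts = Counter(cards)  # Hitung frekuensi setiap angka pada kartu
--
--     min_sum = total_sum  # Inisialisasi dengan total sum (tanpa pembuangan)
--
--     # Coba mengurangi nilai dengan membuang 2 atau 3 kartu dengan angka yang sama
--     for num, count in card_counts.items():
--         if count >= 2:
--             min_sum = min(min_sum, total_sum - num * 2)  # Buang dua kartu yang sama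
--         if count >= 3:
--             min_sum = min(min_sum, total_sum - num * 3)  # Buang tiga kartu yang sama
--
--     return min_sum
-- ===== SOURCE B (Python) =====
-- def min_sum_after_discard(cards):
--     total = sum(cards)
--     best = 0
--     cur = 0
--     run = 0
--     for v in sorted(cards):
--         if run != 0 and v == cur:
--             run += 1
--         else:
--             cur, run = v, 1
--         if run == 2:
--             best = max(best, cur * 2)
--         elif run == 3:
--             best = max(best, cur * 3)
--     return total - best
-- ===== Notes on version B (the rewrite author's own statement) =====
-- stated objective: alternative
-- what changed: Replaces the Counter frequency dictionary and its items() min-scan by sorting the cards and sweeping consecutive equal runs once, tracking the best 2-or-3-equal-card discount and returning total minus it.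
import Mathlib
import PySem

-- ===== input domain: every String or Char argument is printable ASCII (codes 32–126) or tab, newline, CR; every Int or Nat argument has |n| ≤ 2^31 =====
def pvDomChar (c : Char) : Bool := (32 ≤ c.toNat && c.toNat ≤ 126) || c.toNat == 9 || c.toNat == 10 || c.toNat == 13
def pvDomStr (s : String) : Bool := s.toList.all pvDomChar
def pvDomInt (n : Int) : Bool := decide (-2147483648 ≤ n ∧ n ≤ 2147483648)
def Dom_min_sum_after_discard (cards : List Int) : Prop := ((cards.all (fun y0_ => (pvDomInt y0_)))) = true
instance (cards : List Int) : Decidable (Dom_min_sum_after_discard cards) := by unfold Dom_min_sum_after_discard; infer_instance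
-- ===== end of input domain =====

-- B replaces A's Counter dictionary scan by sort-then-run-sweep (alternative algorithm, same result).

-- ===== PORT A =====
def min_sum_after_discard (cards : List Int) : Int :=
  let total_sum := cards.foldl (· + ·) 0
  let card_counts := PySem.Dict.counter cards
  card_counts.items.foldl (fun min_sum p =>
    let m1 := if p.2 ≥ 2 then min min_sum (total_sum - p.1 * 2) else min_sum
    if p.2 ≥ 3 then min m1 (total_sum - p.1 * 3) else m1) total_sum

-- ===== PORT B =====
def bRunLoop (best cur run : Int) : List Int → Int
  | [] => best
  | v :: rest =>
    let cur' := if run ≠ 0 ∧ v = cur then cur else v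
    let run' := if run ≠ 0 ∧ v = cur then run + 1 else 1
    let best' := if run' = 2 then max best (cur' * 2)
                 else if run' = 3 then max best (cur' * 3) else best
    bRunLoop best' cur' run' rest

def min_sum_after_discard_alt (cards : List Int) : Int :=
  let total := cards.foldl (· + ·) 0
  total - bRunLoop 0 0 0 (PySem.List.sorted cards (fun x => x) false)

-- ===== PRECONDITION & SPEC =====
def Spec_min_sum_after_discard (cards : List Int) (out : Int) : Prop := out = min_sum_after_discard_alt cards
instance (cards : List Int) (out : Int) : Decidable (Spec_min_sum_after_discard cards out) := by unfold Spec_min_sum_after_discard; infer_instance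

-- ===== CLAIM (what is proved, stated in full; the proofs are below) =====
def Claim_equal_min_sum_after_discard : Prop := ∀ (cards : List Int), Dom_min_sum_after_discard cards → Spec_min_sum_after_discard cards (min_sum_after_discard cards)

-- ===== LEMMAS AND PROOFS =====

/-- Discount candidates contributed by a value `v` occurring `c` times. -/
def cand (c v : Int) : List Int :=
  (if c ≥ 2 then [v * 2] else []) ++ (if c ≥ 3 then [v * 3] else [])

/-- The discounts B's run sweep records, in order. -/
def emits (cur run : Int) : List Int → List Int
  | [] => []
  | v :: rest =>
    let cur' := if run ≠ 0 ∧ v = cur then cur else v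
    let run' := if run ≠ 0 ∧ v = cur then run + 1 else 1
    (if run' = 2 then [cur' * 2] else if run' = 3 then [cur' * 3] else []) ++ emits cur' run' rest

/-- Discounts emitted within one run segment of length `j` continued from run count `k`. -/
def seg (v k : Int) (j : Nat) : List Int :=
  (if k ≤ 1 ∧ 2 ≤ k + (j : Int) then [v * 2] else []) ++
  (if k ≤ 2 ∧ 3 ≤ k + (j : Int) then [v * 3] else [])

theorem A_fold (items : List (Int × Int)) (t m : Int) :
    items.foldl (fun min_sum p =>
      let m1 := if p.2 ≥ 2 then min min_sum (t - p.1 * 2) else min_sum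
      if p.2 ≥ 3 then min m1 (t - p.1 * 3) else m1) (t - m)
    = t - (items.flatMap (fun p => cand p.2 p.1)).foldl max m := by
  induction items generalizing m with
  | nil => simp
  | cons p rest ih =>
    obtain ⟨v, c⟩ := p
    have key : ∀ (a x : Int), min (t - a) (t - x) = t - max a x := by intro a x; omega
    simp only [List.foldl_cons, List.flatMap_cons, List.foldl_append, cand]
    split_ifs with h3 h4 h4 <;>
      simp only [List.foldl_cons, List.foldl_nil]
    · rw [key, key]; exact ih _
    · exact (h4 (by omega)).elim
    · rw [key]; exact ih _
    · exact ih m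

theorem bRunLoop_eq (l : List Int) (best cur run : Int) :
    bRunLoop best cur run l = (emits cur run l).foldl max best := by
  induction l generalizing best cur run with
  | nil => simp [bRunLoop, emits]
  | cons v rest ih => simp only [bRunLoop, emits, List.foldl_append]; split_ifs <;> simp [ih]

theorem emits_reset (cur run v : Int) (rest : List Int) (h : v ≠ cur) :
    emits cur run (v :: rest) = emits 0 0 (v :: rest) := by
  simp [emits, h]

theorem emits_run (j : Nat) (k v : Int) (s' : List Int) (hk : 1 ≤ k) :
    emits v k (List.replicate j v ++ s') = seg v k j ++ emits v (k + j) s' := by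
  induction j generalizing k with
  | zero =>
    have h1 : ¬ ((k:Int) ≤ 1 ∧ 2 ≤ k) := by omega
    have h2 : ¬ ((k:Int) ≤ 2 ∧ 3 ≤ k) := by omega
    simp [seg, h1, h2]
  | succ j ih =>
    have hne : ¬ (k = 0) := by omega
    simp only [List.replicate_succ, List.cons_append, emits, ne_eq, hne, not_false_iff,
      and_self, if_pos]
    rw [ih (k + 1) (by omega)]
    have hc : k + 1 + (j : Int) = k + ((j + 1 : Nat) : Int) := by push_cast; ring
    rw [← List.append_assoc, hc]
    congr 1
    simp only [seg]
    split_ifs <;> (try simp_all) <;> omega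

theorem sorted_decomp (s : List Int) (hs : s.Pairwise (fun a b => a ≤ b)) (hne : s ≠ []) :
    ∃ (v : Int) (j : Nat) (s' : List Int), s = List.replicate (j+1) v ++ s' ∧
      s'.Pairwise (fun a b => a ≤ b) ∧ ∀ y ∈ s', v < y := by
  induction s with
  | nil => exact absurd rfl hne
  | cons v t ih =>
    rcases List.pairwise_cons.mp hs with ⟨hv, ht⟩
    cases t with
    | nil => exact ⟨v, 0, [], by simp, List.Pairwise.nil, by simp⟩
    | cons w t2 =>
      by_cases hw : w = v
      · obtain ⟨v', j, s', heq, hp, hgt⟩ := ih ht (by simp)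
        rw [List.replicate_succ, List.cons_append] at heq
        have hv' : v' = v := ((List.cons_eq_cons.mp heq).1).symm.trans hw
        rw [hv'] at heq hgt
        refine ⟨v, j + 1, s', ?_, hp, hgt⟩
        rw [List.replicate_succ, List.cons_append, List.replicate_succ,
          List.cons_append, ← heq]
      · refine ⟨v, 0, w :: t2, by simp, ht, ?_⟩
        intro y hy
        have h1 : v ≤ w := hv w (by simp)
        have h2 : v < w := lt_of_le_of_ne h1 (fun h => hw h.symm)
        rcases List.mem_cons.mp hy with h | h
        · exact h ▸ h2
        · exact lt_of_lt_of_le h2 ((List.pairwise_cons.mp ht).1 y h)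

theorem foldl_add_cons (l : List Int) (v : Int) (acc : List Int) (hv : v ∉ l) :
    l.foldl PySem.Set.add (v :: acc) = v :: l.foldl PySem.Set.add acc := by
  induction l generalizing acc with
  | nil => rfl
  | cons x xs ih =>
    have hxv : ¬ (x = v) := fun h => hv (h ▸ List.mem_cons_self)
    have hstep : PySem.Set.add (v :: acc) x = v :: PySem.Set.add acc x := by
      simp only [PySem.Set.add, PySem.Set.contains]
      simp only [List.contains_cons, List.cons_append]
      split_ifs with hh <;> simp_all
    rw [List.foldl_cons, hstep, ih _ (fun h => hv (List.mem_cons_of_mem _ h)), List.foldl_cons]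

theorem foldl_add_replicate (j : Nat) (v : Int) :
    (List.replicate j v).foldl PySem.Set.add [v] = [v] := by
  induction j with
  | zero => rfl
  | succ j ih =>
    have : PySem.Set.add [v] v = [v] := by simp [PySem.Set.add, PySem.Set.contains]
    rw [List.replicate_succ, List.foldl_cons, this, ih]

theorem ofList_replicate_append (j : Nat) (v : Int) (s' : List Int) (hv : v ∉ s') :
    PySem.Set.ofList (List.replicate (j+1) v ++ s') = v :: PySem.Set.ofList s' := by
  rw [PySem.Set.ofList_eq_foldl, PySem.Set.ofList_eq_foldl, List.foldl_append,
    List.replicate_succ, List.foldl_cons]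
  have h0 : PySem.Set.add [] v = [v] := rfl
  rw [h0, foldl_add_replicate, foldl_add_cons _ _ _ hv]

theorem emits_sorted_aux (n : Nat) : ∀ (s : List Int), s.length ≤ n →
    s.Pairwise (fun a b => a ≤ b) →
    emits 0 0 s = (PySem.Set.ofList s).flatMap (fun w => cand ((s.count w : Nat) : Int) w) := by
  induction n with
  | zero =>
    intro s hl _
    have : s = [] := List.eq_nil_of_length_eq_zero (Nat.le_zero.mp hl)
    subst this; rfl
  | succ n ih =>
    intro s hl hs
    cases hcs : s with
    | nil => rfl
    | cons a t =>
      obtain ⟨v, j, s', heq, hp, hgt⟩ := sorted_decomp s hs (by simp [hcs])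
      have hvnot : v ∉ s' := fun h => lt_irrefl v (hgt v h)
      subst hcs
      rw [heq]
      -- left side: peel the first element of the run
      rw [heq] at hl
      simp only [List.length_append, List.length_replicate] at hl
      have hl' : s'.length ≤ n := by omega
      have hstep1 : emits 0 0 (List.replicate (j+1) v ++ s')
          = emits v 1 (List.replicate j v ++ s') := by
        simp [List.replicate_succ, emits]
      have hreset : emits v (1 + (j:Int)) s' = emits 0 0 s' := by
        cases s' with
        | nil => rfl
        | cons w t2 =>
          exact emits_reset v _ w t2 (fun h => lt_irrefl v (h ▸ hgt w List.mem_cons_self))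
      have hcv : (List.replicate (j+1) v ++ s').count v = j + 1 := by
        rw [List.count_append, List.count_eq_zero.mpr hvnot, List.count_replicate]
        simp
      have hcw : ∀ w ∈ PySem.Set.ofList s',
          ((List.replicate (j+1) v ++ s').count w : Int) = ((s'.count w : Nat) : Int) := by
        intro w hw
        have hw' : w ∈ s' := (PySem.Set.mem_ofList s' w).mp hw
        have hwv : w ≠ v := fun h => lt_irrefl v (h ▸ hgt w hw')
        rw [List.count_append, List.count_eq_zero.mpr (by simp [List.mem_replicate, hwv])]
        simp
      rw [hstep1, emits_run j 1 v s' le_rfl, hreset, ih s' hl' hp,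
        ofList_replicate_append j v s' hvnot, List.flatMap_cons]
      have e1 : seg v 1 j
          = cand (((List.replicate (j+1) v ++ s').count v : Nat) : Int) v := by
        rw [hcv]
        simp only [seg, cand]
        split_ifs <;> (try simp_all) <;> omega
      have e2 : (PySem.Set.ofList s').flatMap (fun w => cand ((s'.count w : Nat) : Int) w)
          = (PySem.Set.ofList s').flatMap
              (fun w => cand (((List.replicate (j+1) v ++ s').count w : Nat) : Int) w) := by
        rw [List.flatMap, List.flatMap]
        congr 1
        exact List.map_congr_left (fun w hw => by rw [hcw w hw])
      rw [e1, ← e2]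

theorem le_foldl_max (l : List Int) (a : Int) : a ≤ l.foldl max a := by
  induction l generalizing a with
  | nil => simp
  | cons x xs ih => exact le_trans (le_max_left a x) (ih (max a x))

theorem mem_le_foldl_max (l : List Int) (a x : Int) (hx : x ∈ l) : x ≤ l.foldl max a := by
  induction l generalizing a with
  | nil => cases hx
  | cons y ys ih =>
    rw [List.foldl_cons]
    rcases List.mem_cons.mp hx with h | h
    · subst h; exact le_trans (le_max_right a x) (le_foldl_max ys (max a x))
    · exact ih (max a y) h

theorem foldl_max_cases (l : List Int) (a : Int) : l.foldl max a = a ∨ l.foldl max a ∈ l := by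
  induction l generalizing a with
  | nil => exact Or.inl rfl
  | cons x xs ih =>
    rw [List.foldl_cons]
    rcases ih (max a x) with h | h
    · rcases max_choice a x with h2 | h2
      · exact Or.inl (by rw [h, h2])
      · exact Or.inr (by rw [h, h2]; exact List.mem_cons_self)
    · exact Or.inr (List.mem_cons_of_mem _ h)

theorem foldl_max_mem_iff (l1 l2 : List Int) (a : Int) (h : ∀ x, x ∈ l1 ↔ x ∈ l2) :
    l1.foldl max a = l2.foldl max a := by
  apply le_antisymm
  · rcases foldl_max_cases l1 a with h1 | h1
    · rw [h1]; exact le_foldl_max l2 a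
    · exact mem_le_foldl_max l2 a _ ((h _).mp h1)
  · rcases foldl_max_cases l2 a with h1 | h1
    · rw [h1]; exact le_foldl_max l1 a
    · exact mem_le_foldl_max l1 a _ ((h _).mpr h1)

-- ===== VERDICT (by name: the statement is the Claim_ definition above) =====
theorem min_sum_after_discard_spec : Claim_equal_min_sum_after_discard := by
  unfold Claim_equal_min_sum_after_discard Spec_min_sum_after_discard
  intro cards _
  unfold min_sum_after_discard min_sum_after_discard_alt
  simp only [PySem.Dict.items_counter]
  set t := cards.foldl (fun a b => a + b) 0 with ht
  set srt := PySem.List.sorted cards (fun x => x) false with hsrt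
  have hA : ((PySem.Set.ofList cards).map
        (fun k => (k, (cards.count k : Int)))).foldl (fun min_sum p =>
        let m1 := if p.2 ≥ 2 then min min_sum (t - p.1 * 2) else min_sum
        if p.2 ≥ 3 then min m1 (t - p.1 * 3) else m1) t
      = t - (((PySem.Set.ofList cards).map
          (fun k => (k, (cards.count k : Int)))).flatMap
            (fun p => cand p.2 p.1)).foldl max 0 := by
    have := A_fold ((PySem.Set.ofList cards).map (fun k => (k, (cards.count k : Int)))) t 0
    rw [sub_zero] at this
    exact this
  rw [hA, bRunLoop_eq, emits_sorted_aux srt.length srt le_rfl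
    (by simpa using PySem.List.sorted_pairwise cards (fun x => x))]
  congr 1
  apply foldl_max_mem_iff
  intro x
  have hperm : srt.Perm cards := PySem.List.sorted_perm cards (fun x => x) false
  have hcnt : ∀ w : Int, srt.count w = cards.count w := fun w => hperm.count_eq w
  simp only [hsrt, List.mem_flatMap, List.mem_map, PySem.Set.mem_ofList,
    PySem.List.mem_sorted]
  constructor
  · rintro ⟨p, ⟨k, hk, rfl⟩, hx⟩
    exact ⟨k, hk, by rwa [hcnt k]⟩
  · rintro ⟨k, hk, hx⟩
    exact ⟨(k, (cards.count k : Int)), ⟨k, hk, rfl⟩, by rwa [hcnt k] at hx⟩
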